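-- pv_equiv track=rewrite | github.com/Jeuners/provimedia-mcp-ddcase-2 | src/mcp-server/chainguard/package_validator.py | find_similar_packages
-- ===== SOURCE A (Python) =====
-- from typing import Dict, List, Set, Optional, Tuple, Any
--
-- def levenshtein_distance(s1: str, s2: str) -> int:
--     """Calculate Levenshtein distance between two strings."""
--     if len(s1) < len(s2):
--         return levenshtein_distance(s2, s1)
--
--     if len(s2) == 0:
--         return len(s1)
--
--     previous_row = range(len(s2) + 1)
--     for i, c1 in enumerate(s1):
--         current_row = [i + 1]
--         for j, c2 in enumerate(s2):
--             insertions = previous_row[j + 1] + 1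
--             deletions = current_row[j] + 1
--             substitutions = previous_row[j] + (c1 != c2)
--             current_row.append(min(insertions, deletions, substitutions))
--         previous_row = current_row
--
--     return previous_row[-1]
--
-- def find_similar_packages(
--     package: str,
--     known_packages: Set[str],
--     max_distance: int = 2
-- ) -> List[Tuple[str, int]]:
--     """Find packages with similar names (potential typos or slopsquatting).
--
--     Returns list of (package_name, distance) sorted by distance.
--     """
--     similar = []
--     package_lower = package.lower()
--
--     for known in known_packages:
--         known_lower = known.lower()
--
--         # Skip if too different in length
--         if abs(len(package) - len(known)) > max_distance:
--             continue
--
--         distance = levenshtein_distance(package_lower, known_lower)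
--
--         if 0 < distance <= max_distance:
--             similar.append((known, distance))
--
--     # Sort by distance
--     similar.sort(key=lambda x: x[1])
--     return similar
-- ===== SOURCE B (Python) =====
-- def find_similar_packages(package, known_packages, max_distance=2):
--     """Same result as A: candidates passing the length pre-filter get their
--     edit distance from a top-down memoized recursion (instead of A's
--     bottom-up rolling-row DP); staged comprehension + filter, then the same
--     stable sort by distance."""
--     package_lower = package.lower()
--     pairs = [(known, _lev(package_lower, known.lower()))
--              for known in known_packages
--              if abs(len(package) - len(known)) <= max_distance]
--     return sorted([kd for kd in pairs if 0 < kd[1] <= max_distance],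
--                   key=lambda kd: kd[1])
--
--
-- def _lev(s1, s2):
--     """Levenshtein distance by memoized recursion on prefix lengths:
--     e(i, j) = distance between s1[:i] and s2[:j]."""
--     memo = {}
--
--     def e(i, j):
--         if (i, j) in memo:
--             return memo[(i, j)]
--         if i == 0:
--             v = j
--         elif j == 0:
--             v = i
--         elif s1[i - 1] == s2[j - 1]:
--             v = e(i - 1, j - 1)
--         else:
--             v = 1 + min(e(i - 1, j - 1), e(i - 1, j), e(i, j - 1))
--         memo[(i, j)] = v
--         return v
--
--     return e(len(s1), len(s2))
-- ===== Notes on version B (the rewrite author's own statement) =====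
-- stated objective: alternative
-- what changed: B computes each Levenshtein distance by a top-down memoized recursion over prefix-length pairs (base cases at i=0/j=0, match follows the diagonal, mismatch takes 1+min of the three sub-calls cached in a dict) instead of A's bottom-up rolling-row DP, drops A's swap-to-longer-string guard (distance is symmetric), and builds the result as a staged comprehension + filter before the same stable sort.
import Mathlib
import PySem

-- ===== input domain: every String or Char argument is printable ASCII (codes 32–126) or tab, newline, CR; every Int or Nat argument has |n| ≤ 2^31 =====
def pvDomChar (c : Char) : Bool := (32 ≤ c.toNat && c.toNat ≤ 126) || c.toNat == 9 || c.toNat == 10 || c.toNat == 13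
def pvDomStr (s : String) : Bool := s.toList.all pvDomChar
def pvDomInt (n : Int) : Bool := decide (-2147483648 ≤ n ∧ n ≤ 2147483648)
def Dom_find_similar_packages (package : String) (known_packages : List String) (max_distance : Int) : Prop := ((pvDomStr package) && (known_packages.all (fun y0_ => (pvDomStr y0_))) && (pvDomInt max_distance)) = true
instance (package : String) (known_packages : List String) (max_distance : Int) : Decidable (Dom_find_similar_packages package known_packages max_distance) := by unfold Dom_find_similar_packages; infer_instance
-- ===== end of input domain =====

-- B replaces A's bottom-up rolling-row Levenshtein DP by a top-down memoized recursion over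
-- prefix-length pairs (no swap guard; distance is symmetric) and stages the outer loop as
-- comprehension + filter before the same stable sort (objective: alternative, same value).

-- ===== PORT A =====
-- inner loop of A's levenshtein_distance: builds current_row from previous_row.
-- All prev/cur indexing is in range, so pyGetD (with default 0) is exact here.
def pvStepA (prev : List Int) (c1 : Char) (cur : List Int) (jc : Int × Char) : List Int :=
  let insertions := PySem.List.pyGetD prev (jc.1 + 1) 0 + 1
  let deletions := PySem.List.pyGetD cur jc.1 0 + 1
  let substitutions := PySem.List.pyGetD prev jc.1 0 + (if c1 ≠ jc.2 then 1 else 0)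
  cur ++ [min (min insertions deletions) substitutions]

def pvRowA (prev : List Int) (i : Int) (c1 : Char) (s2 : List Char) : List Int :=
  (PySem.List.enumerate s2 0).foldl (pvStepA prev c1) [i + 1]

-- body of levenshtein_distance after the swap guard. Python's recursive call
-- 'levenshtein_distance(s2, s1)' is entered at most once (after the swap the guard is
-- false), so it is ported as a direct call to this rest-of-the-body helper.
def pvLevGo (s1 s2 : String) : Int :=
  if PySem.Str.len s2 == 0 then PySem.Str.len s1
  else
    let previous_row := PySem.List.pyRange 0 (PySem.Str.len s2 + 1) 1
    let final := (PySem.List.enumerate s1.toList 0).foldl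
      (fun prev ic => pvRowA prev ic.1 ic.2 s2.toList) previous_row
    PySem.List.pyGetD final (-1) 0    -- previous_row[-1]

def levenshtein_distance (s1 s2 : String) : Int :=
  if PySem.Str.len s1 < PySem.Str.len s2 then pvLevGo s2 s1
  else pvLevGo s1 s2

def find_similar_packages (package : String) (known_packages : List String) (max_distance : Int) : List (String × Int) :=
  let package_lower := PySem.Str.lower package
  let similar := known_packages.foldl
    (fun similar known =>
      let known_lower := PySem.Str.lower known
      if |PySem.Str.len package - PySem.Str.len known| > max_distance then similar
      else
        let distance := levenshtein_distance package_lower known_lower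
        if 0 < distance ∧ distance ≤ max_distance then similar ++ [(known, distance)]
        else similar)
    []
  PySem.List.sorted similar (fun x => x.2) false

-- ===== PORT B =====
-- B's memoized recursion e(i, j): distance between s1[:i] and s2[:j], results cached in a
-- dict keyed by the (always nonnegative) index pair; the memo threads through the calls in
-- Python's evaluation order. s1.getD (i-1) ' ' is s1[i-1], in range since 0 < i ≤ len s1.
def pvE (s1 s2 : List Char) (i j : Nat) (m : PySem.Dict (Nat × Nat) Int) :
    Int × PySem.Dict (Nat × Nat) Int :=
  match m.get? (i, j) with
  | some v => (v, m)
  | none =>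
    let vm : Int × PySem.Dict (Nat × Nat) Int :=
      if hi : i = 0 then ((j : Int), m)
      else if hj : j = 0 then ((i : Int), m)
      else if s1.getD (i - 1) ' ' == s2.getD (j - 1) ' ' then pvE s1 s2 (i - 1) (j - 1) m
      else
        let r1 := pvE s1 s2 (i - 1) (j - 1) m
        let r2 := pvE s1 s2 (i - 1) j r1.2
        let r3 := pvE s1 s2 i (j - 1) r2.2
        (1 + min (min r1.1 r2.1) r3.1, r3.2)
    (vm.1, vm.2.insert (i, j) vm.1)
termination_by i + j
decreasing_by all_goals omega

def pvLevMemo (s1 s2 : String) : Int :=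
  (pvE s1.toList s2.toList s1.toList.length s2.toList.length PySem.Dict.empty).1

def find_similar_packages_alt (package : String) (known_packages : List String) (max_distance : Int) : List (String × Int) :=
  let package_lower := PySem.Str.lower package
  let pairs := (known_packages.filter
      (fun known => decide (|PySem.Str.len package - PySem.Str.len known| ≤ max_distance))).map
    (fun known => (known, pvLevMemo package_lower (PySem.Str.lower known)))
  PySem.List.sorted (pairs.filter (fun kd => decide (0 < kd.2 ∧ kd.2 ≤ max_distance)))
    (fun kd => kd.2) false

-- ===== PRECONDITION & SPEC =====
def Spec_find_similar_packages (package : String) (known_packages : List String) (max_distance : Int) (out : List (String × Int)) : Prop := out = find_similar_packages_alt package known_packages max_distance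
instance (package : String) (known_packages : List String) (max_distance : Int) (out : List (String × Int)) : Decidable (Spec_find_similar_packages package known_packages max_distance out) := by unfold Spec_find_similar_packages; infer_instance

-- ===== CLAIM (what is proved, stated in full; the proofs are below) =====
def Claim_equal_find_similar_packages : Prop := ∀ (package : String) (known_packages : List String) (max_distance : Int), Dom_find_similar_packages package known_packages max_distance → Spec_find_similar_packages package known_packages max_distance (find_similar_packages package known_packages max_distance)

-- ===== LEMMAS AND PROOFS =====

-- mathematical reference: lev(s1[:i], s2[:j]) in B's case order
def levRec (s1 s2 : List Char) (i j : Nat) : Int :=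
  if hi : i = 0 then (j : Int)
  else if hj : j = 0 then (i : Int)
  else if s1.getD (i - 1) ' ' == s2.getD (j - 1) ' ' then levRec s1 s2 (i - 1) (j - 1)
  else 1 + min (min (levRec s1 s2 (i - 1) (j - 1)) (levRec s1 s2 (i - 1) j))
        (levRec s1 s2 i (j - 1))
termination_by i + j
decreasing_by all_goals omega


-- one-step unfolding of levRec in plain-if form
theorem levRec_eq (s1 s2 : List Char) (i j : Nat) :
    levRec s1 s2 i j =
      if i = 0 then (j : Int)
      else if j = 0 then (i : Int)
      else if s1.getD (i - 1) ' ' == s2.getD (j - 1) ' ' then levRec s1 s2 (i - 1) (j - 1)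
      else 1 + min (min (levRec s1 s2 (i - 1) (j - 1)) (levRec s1 s2 (i - 1) j))
            (levRec s1 s2 i (j - 1)) := by
  rw [levRec]
  simp only [dite_eq_ite]

theorem levRec_zero_left (s1 s2 : List Char) (j : Nat) : levRec s1 s2 0 j = (j : Int) := by
  rw [levRec_eq]; simp

theorem levRec_zero_right (s1 s2 : List Char) (i : Nat) : levRec s1 s2 i 0 = (i : Int) := by
  rw [levRec_eq]
  by_cases hi : i = 0 <;> simp [hi]

theorem levRec_succ_succ (s1 s2 : List Char) (i j : Nat) :
    levRec s1 s2 (i + 1) (j + 1) =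
      if s1.getD i ' ' == s2.getD j ' ' then levRec s1 s2 i j
      else 1 + min (min (levRec s1 s2 i j) (levRec s1 s2 i (j + 1)))
            (levRec s1 s2 (i + 1) j) := by
  rw [levRec_eq]; simp

-- levRec is symmetric in its two strings
theorem levRec_symm (s1 s2 : List Char) :
    ∀ (n i j : Nat), i + j ≤ n → levRec s1 s2 i j = levRec s2 s1 j i := by
  intro n
  induction n with
  | zero =>
    intro i j h
    have hi : i = 0 := by omega
    have hj : j = 0 := by omega
    subst hi; subst hj
    rw [levRec_zero_left, levRec_zero_left]
  | succ n ih =>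
    intro i j h
    match i, j with
    | 0, j => rw [levRec_zero_left, levRec_zero_right]
    | i + 1, 0 => rw [levRec_zero_right, levRec_zero_left]
    | i + 1, j + 1 =>
      rw [levRec_succ_succ, levRec_succ_succ]
      have hcomm : (s2.getD j ' ' == s1.getD i ' ') = (s1.getD i ' ' == s2.getD j ' ') := by
        rw [Bool.beq_comm]
      rw [hcomm]
      by_cases hc : (s1.getD i ' ' == s2.getD j ' ') = true
      · rw [if_pos hc, if_pos hc]
        exact ih i j (by omega)
      · rw [if_neg hc, if_neg hc]
        rw [ih i j (by omega), ih i (j+1) (by omega), ih (i+1) j (by omega)]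
        omega

-- neighbouring levRec cells differ by at most 1
theorem levRec_adj (s1 s2 : List Char) :
    ∀ (n i j : Nat), i + j ≤ n →
      (levRec s1 s2 (i+1) j ≤ levRec s1 s2 i j + 1 ∧ levRec s1 s2 i j ≤ levRec s1 s2 (i+1) j + 1) ∧
      (levRec s1 s2 i (j+1) ≤ levRec s1 s2 i j + 1 ∧ levRec s1 s2 i j ≤ levRec s1 s2 i (j+1) + 1) := by
  intro n
  induction n with
  | zero =>
    intro i j h
    have hi : i = 0 := by omega
    have hj : j = 0 := by omega
    subst hi; subst hj
    rw [levRec_zero_left, levRec_zero_right, levRec_zero_left]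
    norm_num
  | succ n ih =>
    intro i j h
    constructor
    · -- rows: decompose j
      match j with
      | 0 =>
        rw [levRec_zero_right, levRec_zero_right]
        push_cast; omega
      | j + 1 =>
        rw [levRec_succ_succ]
        have h1 := (ih i j (by omega)).1
        have h2 := (ih i j (by omega)).2
        by_cases hc : (s1.getD i ' ' == s2.getD j ' ') = true
        · rw [if_pos hc]; omega
        · rw [if_neg hc]; omega
    · -- columns: decompose i
      match i with
      | 0 =>
        rw [levRec_zero_left, levRec_zero_left]
        push_cast; omega
      | i + 1 =>
        rw [levRec_succ_succ]
        have h1 := (ih i j (by omega)).1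
        have h2 := (ih i j (by omega)).2
        by_cases hc : (s1.getD i ' ' == s2.getD j ' ') = true
        · rw [if_pos hc]; omega
        · rw [if_neg hc]; omega

-- what A's inner-loop min computes is the next levRec cell
theorem stepA_min (s1 s2 : List Char) (i j : Nat) :
    min (min (levRec s1 s2 i (j+1) + 1) (levRec s1 s2 (i+1) j + 1))
        (levRec s1 s2 i j + (if s1.getD i ' ' ≠ s2.getD j ' ' then 1 else 0))
      = levRec s1 s2 (i+1) (j+1) := by
  rw [levRec_succ_succ]
  have hcol := ((levRec_adj s1 s2 (i+j) i j) (le_refl _)).2.2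
  have hrow := ((levRec_adj s1 s2 (i+j) i j) (le_refl _)).1.2
  by_cases hc : s1.getD i ' ' = s2.getD j ' '
  · rw [if_pos (beq_iff_eq.mpr hc), if_neg (fun hne => hne hc)]
    omega
  · have hb : ¬ ((s1.getD i ' ' == s2.getD j ' ') = true) := fun hh => hc (beq_iff_eq.mp hh)
    rw [if_neg hb, if_pos hc]
    omega

-- the memo invariant: every cached value is the corresponding levRec cell
def pvValid (s1 s2 : List Char) (m : PySem.Dict (Nat × Nat) Int) : Prop :=
  ∀ p v, m.get? p = some v → v = levRec s1 s2 p.1 p.2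

theorem pvValid_empty (s1 s2 : List Char) : pvValid s1 s2 PySem.Dict.empty := by
  intro p v h
  rw [PySem.Dict.get?_empty] at h
  exact absurd h (by simp)

theorem pvValid_insert (s1 s2 : List Char) (m : PySem.Dict (Nat × Nat) Int)
    (i j : Nat) (v : Int) (hm : pvValid s1 s2 m) (hv : v = levRec s1 s2 i j) :
    pvValid s1 s2 (m.insert (i, j) v) := by
  intro p w hw
  rw [PySem.Dict.get?_insert] at hw
  by_cases hp : p = (i, j)
  · rw [if_pos hp] at hw
    cases hw
    rw [hp, hv]
  · rw [if_neg hp] at hw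
    exact hm p w hw

-- B's memoized recursion computes levRec and preserves the invariant
theorem pvE_correct (s1 s2 : List Char) :
    ∀ (n i j : Nat) (m : PySem.Dict (Nat × Nat) Int), i + j ≤ n → pvValid s1 s2 m →
      (pvE s1 s2 i j m).1 = levRec s1 s2 i j ∧ pvValid s1 s2 (pvE s1 s2 i j m).2 := by
  intro n
  induction n with
  | zero =>
    intro i j m h hm
    have hi : i = 0 := by omega
    rw [pvE]
    cases hget : m.get? (i, j) with
    | some v =>
      exact ⟨hm (i, j) v hget, hm⟩
    | none =>
      rw [dif_pos hi]
      exact ⟨by rw [hi, levRec_zero_left], pvValid_insert s1 s2 m i j _ hm (by rw [hi, levRec_zero_left])⟩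
  | succ n ih =>
    intro i j m h hm
    rw [pvE]
    cases hget : m.get? (i, j) with
    | some v =>
      exact ⟨hm (i, j) v hget, hm⟩
    | none =>
      by_cases hi : i = 0
      · rw [dif_pos hi]
        exact ⟨by rw [hi, levRec_zero_left], pvValid_insert s1 s2 m i j _ hm (by rw [hi, levRec_zero_left])⟩
      · by_cases hj : j = 0
        · rw [dif_neg hi, dif_pos hj]
          exact ⟨by rw [hj, levRec_zero_right], pvValid_insert s1 s2 m i j _ hm (by rw [hj, levRec_zero_right])⟩
        · rw [dif_neg hi, dif_neg hj]
          by_cases hc : (s1.getD (i - 1) ' ' == s2.getD (j - 1) ' ') = true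
          · simp only [if_pos hc]
            obtain ⟨h1, h2⟩ := ih (i - 1) (j - 1) m (by omega) hm
            have hlev : levRec s1 s2 i j = levRec s1 s2 (i - 1) (j - 1) := by
              conv_lhs => rw [levRec_eq]
              rw [if_neg hi, if_neg hj, if_pos hc]
            have hval : (pvE s1 s2 (i - 1) (j - 1) m).1 = levRec s1 s2 i j := h1.trans hlev.symm
            exact ⟨hval, pvValid_insert s1 s2 _ i j _ h2 hval⟩
          · simp only [if_neg hc]
            obtain ⟨h1, h2⟩ := ih (i - 1) (j - 1) m (by omega) hm
            obtain ⟨h3, h4⟩ := ih (i - 1) j _ (by omega) h2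
            obtain ⟨h5, h6⟩ := ih i (j - 1) _ (by omega) h4
            have hlev : levRec s1 s2 i j
                = 1 + min (min (levRec s1 s2 (i - 1) (j - 1)) (levRec s1 s2 (i - 1) j))
                    (levRec s1 s2 i (j - 1)) := by
              conv_lhs => rw [levRec_eq]
              rw [if_neg hi, if_neg hj, if_neg hc]
            have hval : 1 + min (min (pvE s1 s2 (i - 1) (j - 1) m).1
                  (pvE s1 s2 (i - 1) j (pvE s1 s2 (i - 1) (j - 1) m).2).1)
                  (pvE s1 s2 i (j - 1) (pvE s1 s2 (i - 1) j (pvE s1 s2 (i - 1) (j - 1) m).2).2).1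
                = levRec s1 s2 i j := by
              rw [h1, h3, h5, hlev]
            exact ⟨hval, pvValid_insert s1 s2 _ i j _ h6 hval⟩

theorem pvLevMemo_eq (s1 s2 : String) :
    pvLevMemo s1 s2 = levRec s1.toList s2.toList s1.toList.length s2.toList.length := by
  unfold pvLevMemo
  exact (pvE_correct s1.toList s2.toList (s1.toList.length + s2.toList.length) _ _
    PySem.Dict.empty (le_refl _) (pvValid_empty _ _)).1


-- row i of A's DP table: [lev(s1[:i], s2[:j]) for j in range(len(s2)+1)]
def rowSpec (s1 s2 : List Char) (i : Nat) : List Int :=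
  (List.range (s2.length + 1)).map (fun j => levRec s1 s2 i j)

theorem rowSpec_getD (s1 s2 : List Char) (i j : Nat) (hj : j ≤ s2.length) :
    PySem.List.pyGetD (rowSpec s1 s2 i) (j : Int) 0 = levRec s1 s2 i j := by
  rw [PySem.List.pyGetD_natCast]
  unfold rowSpec
  rw [List.getD_eq_getElem?_getD, List.getElem?_map, List.getElem?_range (by omega)]
  rfl

-- A's inner loop: starting from a correct prefix of the next row, it completes the row
theorem pvRowA_inner (s1 s2 : List Char) (i : Nat) :
    ∀ (t : List Char) (j : Nat), t = s2.drop j → j ≤ s2.length →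
      (PySem.List.enumerate t (j : Int)).foldl (pvStepA (rowSpec s1 s2 i) (s1.getD i ' '))
          ((List.range (j + 1)).map (fun k => levRec s1 s2 (i + 1) k))
        = rowSpec s1 s2 (i + 1) := by
  intro t
  induction t with
  | nil =>
    intro j ht hj
    have hlen : j = s2.length := by
      have := congrArg List.length ht
      simp [List.length_drop] at this
      omega
    rw [PySem.List.enumerate_nil, List.foldl_nil, hlen]
    rfl
  | cons x t ihx =>
    intro j ht hj
    have hx : s2.getD j ' ' = x := by
      have h0 : s2[j]? = some x := by
        have := congrArg (fun l => l[0]?) ht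
        simpa [List.getElem?_drop] using this.symm
      rw [List.getD_eq_getElem?_getD, h0]
      rfl
    have hjlt : j < s2.length := by
      by_contra hge
      have : s2.drop j = [] := List.drop_eq_nil_of_le (by omega)
      rw [this] at ht
      exact absurd ht (by simp)
    have ht' : t = s2.drop (j + 1) := by
      have := congrArg List.tail ht
      simpa [List.tail_drop] using this
    rw [PySem.List.enumerate_cons, List.foldl_cons]
    have hstep : pvStepA (rowSpec s1 s2 i) (s1.getD i ' ')
        ((List.range (j + 1)).map (fun k => levRec s1 s2 (i + 1) k)) ((j : Int), x)
        = (List.range (j + 1 + 1)).map (fun k => levRec s1 s2 (i + 1) k) := by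
      unfold pvStepA
      have e1 : PySem.List.pyGetD (rowSpec s1 s2 i) ((j : Int) + 1) 0 = levRec s1 s2 i (j + 1) := by
        have : ((j : Int) + 1) = ((j + 1 : Nat) : Int) := by push_cast; ring
        rw [this, rowSpec_getD s1 s2 i (j + 1) (by omega)]
      have e2 : PySem.List.pyGetD ((List.range (j + 1)).map (fun k => levRec s1 s2 (i + 1) k))
          (j : Int) 0 = levRec s1 s2 (i + 1) j := by
        rw [PySem.List.pyGetD_natCast, List.getD_eq_getElem?_getD, List.getElem?_map,
          List.getElem?_range (by omega)]
        rfl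
      have e3 : PySem.List.pyGetD (rowSpec s1 s2 i) (j : Int) 0 = levRec s1 s2 i j :=
        rowSpec_getD s1 s2 i j (by omega)
      simp only [e1, e2, e3]
      rw [List.range_succ (n := j + 1), List.map_append]
      congr 1
      simp only [List.map_cons, List.map_nil]
      congr 1
      rw [← hx]
      exact stepA_min s1 s2 i j
    rw [hstep]
    have : ((j : Int) + 1) = ((j + 1 : Nat) : Int) := by push_cast; ring
    rw [this]
    exact ihx (j + 1) ht' (by omega)

-- A's outer loop: folding the remaining rows takes rowSpec i to the last row
theorem pvRowA_outer (s1 s2 : List Char) :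
    ∀ (t : List Char) (i : Nat), t = s1.drop i → i ≤ s1.length →
      (PySem.List.enumerate t (i : Int)).foldl (fun prev ic => pvRowA prev ic.1 ic.2 s2)
          (rowSpec s1 s2 i)
        = rowSpec s1 s2 s1.length := by
  intro t
  induction t with
  | nil =>
    intro i ht hi
    have : i = s1.length := by
      have := congrArg List.length ht
      simp [List.length_drop] at this
      omega
    rw [PySem.List.enumerate_nil, List.foldl_nil, this]
  | cons x t ihx =>
    intro i ht hi
    have hx : s1.getD i ' ' = x := by
      have h0 : s1[i]? = some x := by
        have := congrArg (fun l => l[0]?) ht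
        simpa [List.getElem?_drop] using this.symm
      rw [List.getD_eq_getElem?_getD, h0]
      rfl
    have hilt : i < s1.length := by
      by_contra hge
      have : s1.drop i = [] := List.drop_eq_nil_of_le (by omega)
      rw [this] at ht
      exact absurd ht (by simp)
    have ht' : t = s1.drop (i + 1) := by
      have := congrArg List.tail ht
      simpa [List.tail_drop] using this
    rw [PySem.List.enumerate_cons, List.foldl_cons]
    have hrow : pvRowA (rowSpec s1 s2 i) (i : Int) x s2 = rowSpec s1 s2 (i + 1) := by
      unfold pvRowA
      have hinit : [((i : Int) + 1)] = (List.range (0 + 1)).map (fun k => levRec s1 s2 (i + 1) k) := by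
        simp [levRec_zero_right]
      rw [hinit, ← hx]
      exact pvRowA_inner s1 s2 i s2 0 rfl (by omega)
    rw [hrow]
    have : ((i : Int) + 1) = ((i + 1 : Nat) : Int) := by push_cast; ring
    rw [this]
    exact ihx (i + 1) ht' (by omega)

-- the body of A's levenshtein_distance computes levRec at the full lengths
theorem pvLevGo_eq (s1 s2 : String) :
    pvLevGo s1 s2 = levRec s1.toList s2.toList s1.toList.length s2.toList.length := by
  unfold pvLevGo
  have hlen1 : PySem.Str.len s1 = (s1.toList.length : Int) := by simp [PySem.Str.len_eq]
  have hlen2 : PySem.Str.len s2 = (s2.toList.length : Int) := by simp [PySem.Str.len_eq]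
  by_cases h2 : s2.toList.length = 0
  · rw [if_pos (by rw [hlen2, h2]; rfl)]
    rw [hlen1, h2, levRec_zero_right]
  · rw [if_neg (by rw [hlen2]; simpa using h2)]
    have hrange : PySem.List.pyRange 0 (PySem.Str.len s2 + 1) 1 = rowSpec s1.toList s2.toList 0 := by
      rw [hlen2, PySem.List.pyRange_one]
      unfold rowSpec
      have : ((s2.toList.length : Int) + 1 - 0).toNat = s2.toList.length + 1 := by omega
      rw [this]
      apply List.map_congr_left
      intro k hk
      rw [levRec_zero_left]
      omega
    have hfold : List.foldl (fun prev ic => pvRowA prev ic.1 ic.2 s2.toList)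
        (rowSpec s1.toList s2.toList 0) (PySem.List.enumerate s1.toList 0)
        = rowSpec s1.toList s2.toList s1.toList.length := by
      have := pvRowA_outer s1.toList s2.toList s1.toList 0 rfl (by omega)
      simpa using this
    simp only [hrange, hfold]
    have hne : rowSpec s1.toList s2.toList s1.toList.length ≠ [] := by
      unfold rowSpec
      simp
    rw [PySem.List.pyGetD_neg_one _ _ hne]
    unfold rowSpec
    rw [List.getLast_eq_getElem]
    simp

-- A's levenshtein_distance and B's memoized recursion agree on every pair of strings
theorem lev_eq_memo (s1 s2 : String) : levenshtein_distance s1 s2 = pvLevMemo s1 s2 := by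
  unfold levenshtein_distance
  rw [pvLevMemo_eq]
  by_cases h : PySem.Str.len s1 < PySem.Str.len s2
  · rw [if_pos h, pvLevGo_eq,
      levRec_symm s2.toList s1.toList (s2.toList.length + s1.toList.length) _ _ (le_refl _)]
  · rw [if_neg h, pvLevGo_eq]

-- ===== VERDICT (by name: the statement is the Claim_ definition above) =====
theorem find_similar_packages_spec : Claim_equal_find_similar_packages := by
  unfold Claim_equal_find_similar_packages Spec_find_similar_packages
  intro package knowns md _dom
  unfold find_similar_packages find_similar_packages_alt
  dsimp only
  -- shared per-candidate pieces
  let dist : String → Int := fun known =>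
    pvLevMemo (PySem.Str.lower package) (PySem.Str.lower known)
  let f : String → String × Int := fun known => (known, dist known)
  let Pb : String → Bool := fun known =>
    decide (|PySem.Str.len package - PySem.Str.len known| ≤ md)
      && decide (0 < dist known ∧ dist known ≤ md)
  -- A's loop body in append-if form
  have hA : (fun (similar : List (String × Int)) known =>
      let known_lower := PySem.Str.lower known
      if |PySem.Str.len package - PySem.Str.len known| > md then similar
      else
        let distance := levenshtein_distance (PySem.Str.lower package) known_lower
        if 0 < distance ∧ distance ≤ md then similar ++ [(known, distance)] else similar)
      = (fun similar known => if Pb known then similar ++ [f known] else similar) := by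
    funext similar known
    dsimp only [Pb, dist, f]
    rw [lev_eq_memo]
    by_cases h1 : |PySem.Str.len package - PySem.Str.len known| > md
    · rw [if_pos h1]
      have hfalse : (decide (|PySem.Str.len package - PySem.Str.len known| ≤ md)) = false := by
        rw [decide_eq_false_iff_not]
        omega
      simp only [hfalse, Bool.false_and, Bool.false_eq_true, if_false]
    · rw [if_neg h1]
      have hlen : (decide (|PySem.Str.len package - PySem.Str.len known| ≤ md)) = true :=
        decide_eq_true (by omega)
      simp only [hlen, Bool.true_and]
      by_cases h2 : 0 < pvLevMemo (PySem.Str.lower package) (PySem.Str.lower known)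
          ∧ pvLevMemo (PySem.Str.lower package) (PySem.Str.lower known) ≤ md
      · rw [if_pos h2, if_pos (decide_eq_true h2)]
      · rw [if_neg h2, if_neg (fun hq => h2 (of_decide_eq_true hq))]
  rw [hA, PySem.List.foldl_append_if Pb f knowns []]
  rw [List.nil_append]
  -- the two sorted lists coincide
  congr 1
  rw [List.filter_map]
  have hcomp : ((fun (kd : String × Int) => decide (0 < kd.2 ∧ kd.2 ≤ md)) ∘ f)
      = fun known => decide (0 < dist known ∧ dist known ≤ md) := rfl
  rw [hcomp, List.filter_filter]
  congr 1
  apply List.filter_congr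
  intro x _
  dsimp only [Pb]
  rw [Bool.and_comm]
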